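-- pv_equiv track=rewrite | github.com/mhems/aoc | 2021/day17/a.py | find_highest_trajectory
-- ===== SOURCE A (Python) =====
-- def simulate(velocity: (int, int), x: (int, int), y: (int, int)) -> (bool, int):
--     vx, vy = velocity
--     startx, endx = x
--     starty, endy = y
--     x, y, peak = 0, 0, 0
--     while True:
--         x += vx
--         y += vy
--         peak = max(peak, y)
--         if startx <= x <= endx and starty <= y <= endy:
--             return True, peak
--         if y < starty:
--             return False, peak
--         vx = vx - 1 if vx > 0 else vx
--         vy -= 1
--
-- def find_highest_trajectory(x: (int, int), y: (int, int), n: int = 200) -> (int, int):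
--     peak = 0
--     hitset = set()
--     for vx in range(n):
--         for vy in range(-n, n):
--             hit, height = simulate((vx, vy), x, y)
--             if hit:
--                 peak = max(height, peak)
--                 hitset.add((vx, vy))
--     return peak, len(hitset)
-- ===== SOURCE B (Python) =====
-- def _y_table(vy, starty, endy):
--     # times t (with running prefix peak) at which the y-coordinate lies in the
--     # target band, up to (and excluding) the first step where y < starty
--     t, ypos, p, v = 0, 0, 0, vy
--     out = []
--     while True:
--         t += 1
--         ypos += v
--         v -= 1
--         if ypos > p:
--             p = ypos
--         if ypos < starty:
--             return out
--         if ypos <= endy: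
--             out.append((t, p))
--
-- def _first_hit(vx, table, startx, endx):
--     # prefix peak at the first tabulated time whose closed-form x lies in the box
--     for t, p in table:
--         m = vx - t
--         if m < 0:
--             m = 0
--         xt = vx * (vx + 1) // 2 - m * (m + 1) // 2
--         if startx <= xt <= endx:
--             return p
--     return None
--
-- def find_highest_trajectory(x: (int, int), y: (int, int), n: int = 200) -> (int, int):
--     startx, endx = x
--     starty, endy = y
--     tables = [(vy, _y_table(vy, starty, endy)) for vy in range(-n, n)]
--     peak = 0
--     hitset = set()
--     for vx in range(n):
--         for vy, table in tables:
--             p = _first_hit(vx, table, startx, endx)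
--             if p is not None:
--                 peak = max(p, peak)
--                 hitset.add((vx, vy))
--     return peak, len(hitset)
-- ===== Notes on version B (the rewrite author's own statement) =====
-- stated objective: faster
-- what changed: B hoists the y-coordinate simulation out of the vx loop (one in-box time/prefix-peak table per vy, built once) and decides each (vx,vy) pair by scanning that table with a closed-form triangular-number x position, instead of A's full per-pair step-by-step simulation; intended as faster, measured 3.4-7x on the timing inputs both programs finish.
import Mathlib
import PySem

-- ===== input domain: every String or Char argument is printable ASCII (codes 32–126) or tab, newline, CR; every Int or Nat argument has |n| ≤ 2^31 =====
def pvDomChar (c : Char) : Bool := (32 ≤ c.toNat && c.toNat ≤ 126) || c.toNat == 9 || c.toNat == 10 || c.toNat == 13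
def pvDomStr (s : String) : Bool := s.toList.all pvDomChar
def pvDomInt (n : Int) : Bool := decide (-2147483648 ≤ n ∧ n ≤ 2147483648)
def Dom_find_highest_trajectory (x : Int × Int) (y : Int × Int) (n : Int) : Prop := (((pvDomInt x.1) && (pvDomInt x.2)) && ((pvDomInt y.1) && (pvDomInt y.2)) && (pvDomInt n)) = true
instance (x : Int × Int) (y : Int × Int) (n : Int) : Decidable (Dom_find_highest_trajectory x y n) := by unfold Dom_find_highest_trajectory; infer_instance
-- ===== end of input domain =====

-- B hoists the y-simulation out of the vx loop (one in-box-time table per vy) and replaces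
-- the per-pair step simulation by a scan of that table with a closed-form x position; same
-- return value, intended as faster (measured 3.4-7x on the timing inputs both finish; on
-- degenerate huge boxes the tables grow and both programs are slow).

-- triangular numbers (used by the termination measure of both loops)
def triN : Nat → Nat
  | 0 => 0
  | n + 1 => triN n + n + 1

-- termination measure for the projectile loops: y eventually drops below sy
def phiSim (sy yp vy : Int) : Nat := (yp - sy).toNat + triN (vy + 1).toNat

theorem phiSim_dec {sy yp vy : Int} (h : sy ≤ yp + vy) :
    phiSim sy (yp + vy) (vy - 1) < phiSim sy yp vy := by
  unfold phiSim
  by_cases hv : 0 ≤ vy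
  · have h1 : (vy + 1).toNat = vy.toNat + 1 := by omega
    have h2 : (vy - 1 + 1).toNat = vy.toNat := by omega
    rw [h1, h2]
    have h3 : triN (vy.toNat + 1) = triN vy.toNat + vy.toNat + 1 := rfl
    omega
  · have h1 : (vy + 1).toNat = 0 := by omega
    have h2 : (vy - 1 + 1).toNat = 0 := by omega
    rw [h1, h2]
    omega

-- ===== PORT A =====
-- the 'while True' loop of simulate
def simAux (sx ex sy ey xp yp vx vy peak : Int) : Bool × Int :=
  let x' := xp + vx
  let y' := yp + vy
  let pk := max peak y'
  if sx ≤ x' ∧ x' ≤ ex ∧ sy ≤ y' ∧ y' ≤ ey then (true, pk)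
  else if _h : y' < sy then (false, pk)
  else simAux sx ex sy ey x' y' (if vx > 0 then vx - 1 else vx) (vy - 1) pk
termination_by phiSim sy yp vy
decreasing_by exact phiSim_dec (by omega)

def simulate (velocity : Int × Int) (x : Int × Int) (y : Int × Int) : Bool × Int :=
  simAux x.1 x.2 y.1 y.2 0 0 velocity.1 velocity.2 0

def find_highest_trajectory (x : Int × Int) (y : Int × Int) (n : Int) : Int × Int :=
  let res := (PySem.List.pyRange 0 n 1).foldl (fun st vx =>
      (PySem.List.pyRange (-n) n 1).foldl (fun st2 vy =>
        let hh := simulate (vx, vy) x y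
        if hh.1 then (max hh.2 st2.1, PySem.Set.add st2.2 (vx, vy)) else st2) st)
    ((0 : Int), (PySem.Set.empty : PySem.Set (Int × Int)))
  (res.1, (res.2.length : Int))

-- ===== PORT B =====
-- the 'while True' loop of _y_table (out is the growing result list)
def ytabAux (sy ey t ypos p v : Int) (out : List (Int × Int)) : List (Int × Int) :=
  let t' := t + 1
  let y' := ypos + v
  let v' := v - 1
  let p' := if y' > p then y' else p
  if _h : y' < sy then out
  else if y' ≤ ey then ytabAux sy ey t' y' p' v' (out ++ [(t', p')])
  else ytabAux sy ey t' y' p' v' out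
termination_by phiSim sy ypos v
decreasing_by all_goals exact phiSim_dec (by omega)

def y_table (vy starty endy : Int) : List (Int × Int) :=
  ytabAux starty endy 0 0 0 vy []

def first_hit (vx : Int) (table : List (Int × Int)) (startx endx : Int) : Option Int :=
  match table with
  | [] => none
  | (t, p) :: rest =>
    let m := if vx - t < 0 then 0 else vx - t
    let xt := PySem.Int.floordiv (vx * (vx + 1)) 2 - PySem.Int.floordiv (m * (m + 1)) 2
    if startx ≤ xt ∧ xt ≤ endx then some p else first_hit vx rest startx endx

def find_highest_trajectory_alt (x : Int × Int) (y : Int × Int) (n : Int) : Int × Int :=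
  let tables := (PySem.List.pyRange (-n) n 1).map (fun vy => (vy, y_table vy y.1 y.2))
  let res := (PySem.List.pyRange 0 n 1).foldl (fun st vx =>
      tables.foldl (fun st2 vt =>
        match first_hit vx vt.2 x.1 x.2 with
        | some p => (max p st2.1, PySem.Set.add st2.2 (vx, vt.1))
        | none => st2) st)
    ((0 : Int), (PySem.Set.empty : PySem.Set (Int × Int)))
  (res.1, (res.2.length : Int))

-- ===== PRECONDITION & SPEC =====
def Spec_find_highest_trajectory (x : Int × Int) (y : Int × Int) (n : Int) (out : Int × Int) : Prop := out = find_highest_trajectory_alt x y n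
instance (x : Int × Int) (y : Int × Int) (n : Int) (out : Int × Int) : Decidable (Spec_find_highest_trajectory x y n out) := by unfold Spec_find_highest_trajectory; infer_instance

-- ===== CLAIM (what is proved, stated in full; the proofs are below) =====
def Claim_equal_find_highest_trajectory : Prop := ∀ (x : Int × Int) (y : Int × Int) (n : Int), Dom_find_highest_trajectory x y n → Spec_find_highest_trajectory x y n (find_highest_trajectory x y n)

-- ===== LEMMAS AND PROOFS =====

-- closed-form x position after t steps for initial x-velocity vx ≥ 0
def xof (vx t : Int) : Int := (triN vx.toNat : Int) - (triN (vx - t).toNat : Int)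

-- A's x-velocity after t steps (vx ≥ 0)
def vcur (vx t : Int) : Int := if t < vx then vx - t else 0

theorem triN_mul_two (k : Nat) : triN k * 2 = k * (k + 1) := by
  induction k with
  | zero => rfl
  | succ m ih => show (triN m + m + 1) * 2 = _ ; nlinarith [ih]

theorem tri_floordiv (k : Int) (hk : 0 ≤ k) :
    PySem.Int.floordiv (k * (k + 1)) 2 = (triN k.toNat : Int) := by
  rw [PySem.Int.floordiv_eq_ediv_of_pos (by norm_num)]
  have hc : (k.toNat : Int) = k := Int.toNat_of_nonneg hk
  have h2 : k * (k + 1) = (triN k.toNat : Int) * 2 := by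
    have := triN_mul_two k.toNat
    have : ((triN k.toNat * 2 : Nat) : Int) = ((k.toNat * (k.toNat + 1) : Nat) : Int) := by
      exact_mod_cast congrArg (Nat.cast : Nat → Int) this
    push_cast at this
    rw [hc] at this
    linarith
  rw [h2, Int.mul_ediv_cancel _ (by norm_num)]

theorem triN_toNat_succ (a : Int) (h : 0 < a) :
    (triN a.toNat : Int) = (triN (a - 1).toNat : Int) + a := by
  have h1 : a.toNat = (a - 1).toNat + 1 := by omega
  rw [h1]
  show ((triN (a - 1).toNat + (a - 1).toNat + 1 : Nat) : Int) = _
  push_cast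
  omega

theorem xof_succ (vx t : Int) (_hvx : 0 ≤ vx) : xof vx (t + 1) = xof vx t + vcur vx t := by
  unfold xof vcur
  by_cases hlt : t < vx
  · have := triN_toNat_succ (vx - t) (by omega)
    have he : vx - t - 1 = vx - (t + 1) := by ring
    rw [he] at this
    simp only [if_pos hlt]
    omega
  · have h1 : (vx - t).toNat = 0 := by omega
    have h2 : (vx - (t + 1)).toNat = 0 := by omega
    rw [h1, h2]
    simp only [if_neg hlt]
    omega

theorem vcur_succ (vx t : Int) (_hvx : 0 ≤ vx) :
    (if vcur vx t > 0 then vcur vx t - 1 else vcur vx t) = vcur vx (t + 1) := by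
  unfold vcur
  split_ifs <;> omega

theorem xof_zero (vx : Int) : xof vx 0 = 0 := by
  unfold xof; simp

theorem vcur_zero (vx : Int) (hvx : 0 ≤ vx) : vcur vx 0 = vx := by
  unfold vcur; split_ifs <;> omega

-- accumulator lemma for ytabAux
theorem ytab_acc (sy ey : Int) : ∀ (k : Nat) (t ypos p v : Int) (out : List (Int × Int)),
    phiSim sy ypos v = k →
    ytabAux sy ey t ypos p v out = out ++ ytabAux sy ey t ypos p v [] := by
  intro k
  induction k using Nat.strong_induction_on with
  | _ k ih =>
    intro t ypos p v out hk
    conv_lhs => rw [ytabAux]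
    conv_rhs => rw [ytabAux]
    by_cases h1 : ypos + v < sy
    · simp [h1]
    · have hdec := phiSim_dec (sy := sy) (yp := ypos) (vy := v) (by omega)
      by_cases h2 : ypos + v ≤ ey
      · simp only [dif_neg h1, if_pos h2]
        rw [ih _ (by omega) (t + 1) (ypos + v) _ (v - 1) (out ++ [(t + 1, _)]) rfl,
            ih _ (by omega) (t + 1) (ypos + v) _ (v - 1) ([] ++ [(t + 1, _)]) rfl]
        simp
      · simp only [dif_neg h1, if_neg h2]
        exact ih _ (by omega) _ _ _ _ out rfl

-- the head entry's closed-form x equals xof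
theorem firsthit_cons (vx t p : Int) (rest : List (Int × Int)) (sx ex : Int) (hvx : 0 ≤ vx) :
    first_hit vx ((t, p) :: rest) sx ex =
      if sx ≤ xof vx t ∧ xof vx t ≤ ex then some p else first_hit vx rest sx ex := by
  rw [first_hit]
  have hm : (if vx - t < 0 then 0 else vx - t) = ((vx - t).toNat : Int) := by
    split_ifs <;> omega
  have hx : PySem.Int.floordiv (vx * (vx + 1)) 2 -
      PySem.Int.floordiv ((if vx - t < 0 then 0 else vx - t) * ((if vx - t < 0 then 0 else vx - t) + 1)) 2
      = xof vx t := by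
    rw [hm, tri_floordiv vx hvx, tri_floordiv _ (by positivity)]
    unfold xof
    simp only [Int.toNat_natCast]
  simp only [hx]

-- CORE: A's per-velocity simulation agrees with B's table scan
theorem core (sx ex sy ey vx : Int) (hvx : 0 ≤ vx) :
    ∀ (k : Nat) (t ypos p v : Int), phiSim sy ypos v = k → 0 ≤ t →
    (fun s : Bool × Int => if s.1 then some s.2 else none)
        (simAux sx ex sy ey (xof vx t) ypos (vcur vx t) v p)
      = first_hit vx (ytabAux sy ey t ypos p v []) sx ex := by
  intro k
  induction k using Nat.strong_induction_on with
  | _ k ih =>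
    intro t ypos p v hk ht
    conv_lhs => rw [simAux]
    conv_rhs => rw [ytabAux]
    by_cases h1 : ypos + v < sy
    · have hnb : ¬(sx ≤ xof vx t + vcur vx t ∧ xof vx t + vcur vx t ≤ ex ∧
          sy ≤ ypos + v ∧ ypos + v ≤ ey) := by intro hc; omega
      simp [h1, hnb, first_hit]
    · have hdec := phiSim_dec (sy := sy) (yp := ypos) (vy := v) (by omega)
      have hx := xof_succ vx t hvx
      have hv := vcur_succ vx t hvx
      have hpk : max p (ypos + v) = if ypos + v > p then ypos + v else p := by
        split_ifs <;> omega
      by_cases h2 : ypos + v ≤ ey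
      · -- entry (t+1, p') is appended
        simp only [dif_neg h1, if_pos h2]
        rw [ytab_acc sy ey _ (t + 1) (ypos + v) _ (v - 1) _ rfl]
        simp only [List.nil_append, List.singleton_append]
        rw [firsthit_cons vx (t + 1) _ _ sx ex hvx]
        by_cases h3 : sx ≤ xof vx (t + 1) ∧ xof vx (t + 1) ≤ ex
        · have hhit : sx ≤ xof vx t + vcur vx t ∧ xof vx t + vcur vx t ≤ ex ∧
              sy ≤ ypos + v ∧ ypos + v ≤ ey := by rw [← hx]; omega
          simp [hhit, h3, hpk]
        · have hnb : ¬(sx ≤ xof vx t + vcur vx t ∧ xof vx t + vcur vx t ≤ ex ∧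
              sy ≤ ypos + v ∧ ypos + v ≤ ey) := by rw [← hx]; omega
          simp only [if_neg hnb, if_neg h3]
          rw [← hx, hv, hpk]
          exact ih _ (by omega) (t + 1) (ypos + v) _ (v - 1) rfl (by omega)
      · -- no entry
        simp only [dif_neg h1, if_neg h2]
        have hnb : ¬(sx ≤ xof vx t + vcur vx t ∧ xof vx t + vcur vx t ≤ ex ∧
            sy ≤ ypos + v ∧ ypos + v ≤ ey) := by intro hc; omega
        simp only [if_neg hnb]
        rw [← hx, hv, hpk]
        exact ih _ (by omega) (t + 1) (ypos + v) _ (v - 1) rfl (by omega)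

theorem simulate_eq_firsthit (x y : Int × Int) (vx vy : Int) (hvx : 0 ≤ vx) :
    (fun s : Bool × Int => if s.1 then some s.2 else none) (simulate (vx, vy) x y)
      = first_hit vx (y_table vy y.1 y.2) x.1 x.2 := by
  have := core x.1 x.2 y.1 y.2 vx hvx (phiSim y.1 0 vy) 0 0 0 vy rfl le_rfl
  rwa [xof_zero, vcur_zero vx hvx] at this
  
-- ===== VERDICT (by name: the statement is the Claim_ definition above) =====
theorem find_highest_trajectory_spec : Claim_equal_find_highest_trajectory := by
  intro x y n _
  unfold Spec_find_highest_trajectory find_highest_trajectory find_highest_trajectory_alt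
  simp only [List.foldl_map]
  rw [PySem.List.foldl_congr_mem]
  intro st vx hvx
  have h0 : 0 ≤ vx := (PySem.List.mem_pyRange_one.mp hvx).1
  apply PySem.List.foldl_congr_mem
  intro st2 vy _
  have hs := simulate_eq_firsthit x y vx vy h0
  cases hsim : simulate (vx, vy) x y with
  | mk b h =>
    cases b
    · rw [hsim] at hs; simp at hs; rw [← hs]; simp
    · rw [hsim] at hs; simp at hs; rw [← hs]; simp
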